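-- pv_equiv track=rewrite | github.com/breivens/scriptingtalen | exercise series (2019–2020)/week_02 [Python]/Rövarspråket.py | encode_a
-- ===== SOURCE A (Python) =====
-- def encode_a(line):
--     new_line, group = "", ""
--     for char in line:
--         if char.isalpha() and char.lower() not in "aeiou":
--             group += char
--         elif group:
--             new_line += "o" + group.lower()
--             group = ""
--         new_line += char
--     if group:
--         new_line += "o" + group.lower()
--     return new_line
-- ===== SOURCE B (Python) =====
-- def encode_a(line):
--     def cons(c):
--         return c.isalpha() and c.lower() not in "aeiou"
--     parts = []
--     i, n = 0, len(line)
--     while i < n: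
--         k = cons(line[i])
--         j = i + 1
--         while j < n and cons(line[j]) == k:
--             j += 1
--         s = line[i:j]
--         parts.append(s + "o" + s.lower() if k else s)
--         i = j
--     return "".join(parts)
-- ===== Notes on version B (the rewrite author's own statement) =====
-- stated objective: alternative
-- what changed: B splits the string into maximal runs by the consonant predicate and processes each whole run at once (appending the encoded run for consonant runs, the run itself otherwise), instead of A's per-character pending-buffer/flush accumulator loop; pieces are joined at the end.
import Mathlib
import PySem

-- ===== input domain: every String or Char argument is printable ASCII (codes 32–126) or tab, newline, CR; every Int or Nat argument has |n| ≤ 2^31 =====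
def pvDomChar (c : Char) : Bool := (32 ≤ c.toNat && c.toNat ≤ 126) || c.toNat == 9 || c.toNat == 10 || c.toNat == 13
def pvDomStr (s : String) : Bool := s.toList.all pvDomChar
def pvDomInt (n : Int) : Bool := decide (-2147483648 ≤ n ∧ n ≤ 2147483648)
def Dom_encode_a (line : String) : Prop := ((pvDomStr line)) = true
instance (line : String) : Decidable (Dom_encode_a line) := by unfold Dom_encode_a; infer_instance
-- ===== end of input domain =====

-- B replaces A's per-character pending-buffer/flush loop by splitting the string into maximal
-- runs of the consonant predicate and processing each run at once (objective: alternative).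

-- ===== PORT A =====
-- char.isalpha() and char.lower() not in "aeiou"  (the predicate both Pythons write inline)
def pvCons (c : Char) : Bool :=
  PySem.Chars.isalpha c && !(['a','e','i','o','u'].contains (PySem.Chars.lowerChar c))

-- one iteration of A's for-loop, state = (new_line, group)
def pvStep (st : List Char × List Char) (c : Char) : List Char × List Char :=
  if pvCons c then (st.1 ++ [c], st.2 ++ [c])
  else if st.2 ≠ [] then (st.1 ++ ('o' :: PySem.Chars.lower st.2) ++ [c], [])
  else (st.1 ++ [c], st.2)

-- A's trailing `if group:` flush
def pvFlush (st : List Char × List Char) : List Char :=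
  st.1 ++ (if st.2 ≠ [] then 'o' :: PySem.Chars.lower st.2 else [])

def encode_a (line : String) : String :=
  String.mk (pvFlush (line.toList.foldl pvStep ([], [])))

-- ===== PORT B =====
-- Source B's inner while-scan of a maximal run ports as takeWhile/dropWhile on the same predicate
def pvAltGo : List Char → List Char
  | [] => []
  | c :: cs =>
    let k := pvCons c
    let run := c :: cs.takeWhile (fun d => pvCons d == k)
    let rest := cs.dropWhile (fun d => pvCons d == k)
    (if k then run ++ 'o' :: PySem.Chars.lower run else run) ++ pvAltGo rest
termination_by cs => cs.length
decreasing_by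
  exact Nat.lt_succ_of_le (List.length_dropWhile_le _ _)

def encode_a_alt (line : String) : String := String.mk (pvAltGo line.toList)

-- ===== PRECONDITION & SPEC =====
def Spec_encode_a (line : String) (out : String) : Prop := out = encode_a_alt line
instance (line : String) (out : String) : Decidable (Spec_encode_a line out) := by unfold Spec_encode_a; infer_instance

-- ===== CLAIM (what is proved, stated in full; the proofs are below) =====
def Claim_equal_encode_a : Prop := ∀ (line : String), Dom_encode_a line → Spec_encode_a line (encode_a line)

-- ===== LEMMAS AND PROOFS =====

theorem pvAltGo_nil : pvAltGo [] = [] := by rw [pvAltGo.eq_def]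

theorem pvAltGo_cons (c : Char) (cs : List Char) :
    pvAltGo (c :: cs) =
      (if pvCons c then
        (c :: cs.takeWhile (fun d => pvCons d == pvCons c)) ++
          'o' :: PySem.Chars.lower (c :: cs.takeWhile (fun d => pvCons d == pvCons c))
       else c :: cs.takeWhile (fun d => pvCons d == pvCons c)) ++
      pvAltGo (cs.dropWhile (fun d => pvCons d == pvCons c)) := by
  rw [pvAltGo.eq_def]

-- the "remaining output" form of A's loop: pending group g, input cs
def pvFA (g : List Char) : List Char → List Char
  | [] => if g = [] then [] else 'o' :: PySem.Chars.lower g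
  | c :: cs =>
    if pvCons c then c :: pvFA (g ++ [c]) cs
    else (if g = [] then [] else 'o' :: PySem.Chars.lower g) ++ c :: pvFA [] cs

theorem pvFoldA (cs : List Char) : ∀ (new g : List Char),
    pvFlush (cs.foldl pvStep (new, g)) = new ++ pvFA g cs := by
  induction cs with
  | nil =>
    intro new g
    by_cases h : g = [] <;> simp [pvFlush, pvFA, h]
  | cons c cs ih =>
    intro new g
    by_cases hc : pvCons c
    · simp only [List.foldl_cons, pvStep, if_pos hc, ih]
      simp [pvFA, hc]
    · by_cases hg : g = []
      · simp only [List.foldl_cons, pvStep, if_neg hc, hg, ne_eq, not_true_eq_false,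
          if_false, ih]
        simp [pvFA, hc, hg]
      · simp only [List.foldl_cons, pvStep, if_neg hc, ne_eq, hg, not_false_iff, if_true, ih]
        simp [pvFA, hc, hg]

-- a consonant run is consumed in one go: fA with pending g emits takeWhile, the flush, and restarts
theorem pvFA_run (cs : List Char) : ∀ (g : List Char),
    pvFA g cs = cs.takeWhile pvCons ++
      (if g ++ cs.takeWhile pvCons = [] then [] else
        'o' :: PySem.Chars.lower (g ++ cs.takeWhile pvCons)) ++
      pvFA [] (cs.dropWhile pvCons) := by
  induction cs with
  | nil => intro g; simp [pvFA]
  | cons c cs ih =>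
    intro g
    by_cases hc : pvCons c
    · simp only [pvFA, if_pos hc, List.takeWhile_cons_of_pos hc, List.dropWhile_cons_of_pos hc]
      rw [ih (g ++ [c])]
      simp
    · simp only [List.takeWhile_cons_of_neg hc, List.dropWhile_cons_of_neg hc, List.append_nil]
      by_cases hg : g = [] <;> simp [pvFA, hc, hg]

-- a non-consonant run passes through unchanged
theorem pvFA_non (cs : List Char) :
    pvFA [] cs = cs.takeWhile (fun d => !pvCons d) ++ pvFA [] (cs.dropWhile (fun d => !pvCons d)) := by
  induction cs with
  | nil => simp [pvFA]
  | cons c cs ih =>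
    by_cases hc : pvCons c
    · rw [List.takeWhile_cons_of_neg (by simp [hc]), List.dropWhile_cons_of_neg (by simp [hc])]
      simp
    · rw [List.takeWhile_cons_of_pos (by simp [hc]), List.dropWhile_cons_of_pos (by simp [hc])]
      simp only [pvFA, if_neg hc, List.nil_append]
      simp [ih]

theorem pvMain (n : Nat) : ∀ (cs : List Char), cs.length ≤ n → pvFA [] cs = pvAltGo cs := by
  induction n with
  | zero =>
    intro cs h
    have : cs = [] := List.eq_nil_of_length_eq_zero (Nat.le_zero.mp h)
    simp [this, pvFA, pvAltGo_nil]
  | succ n ih =>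
    intro cs h
    match cs with
    | [] => simp [pvFA, pvAltGo_nil]
    | c :: cs =>
      rw [pvAltGo_cons]
      by_cases hc : pvCons c
      · have hpred : (fun d => pvCons d == pvCons c) = pvCons := by
          funext d; simp [hc]
        rw [if_pos hc, hpred, pvFA_run, List.takeWhile_cons_of_pos hc,
          List.dropWhile_cons_of_pos hc,
          ih (cs.dropWhile pvCons)
            (le_trans (List.length_dropWhile_le _ _) (Nat.le_of_succ_le_succ h))]
        simp
      · have hpred : (fun d => pvCons d == pvCons c) = (fun d => !pvCons d) := by
          funext d; simp [hc]
        rw [if_neg hc, hpred]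
        conv_lhs => rw [pvFA_non]
        rw [List.takeWhile_cons_of_pos (by simp [hc]), List.dropWhile_cons_of_pos (by simp [hc])]
        rw [ih (cs.dropWhile (fun d => !pvCons d))
          (le_trans (List.length_dropWhile_le _ _) (Nat.le_of_succ_le_succ h))]

-- ===== VERDICT (by name: the statement is the Claim_ definition above) =====
theorem encode_a_spec : Claim_equal_encode_a := by
  intro line _
  unfold Spec_encode_a encode_a encode_a_alt
  rw [pvFoldA line.toList [] [], pvMain line.toList.length line.toList le_rfl]
  simp
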